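-- pv_equiv track=rewrite | github.com/weijunhuang01/ccny_csc360_spr26_group1 | primary_node.py | split_into_slices
-- ===== SOURCE A (Python) =====
-- from typing import Any, Dict, List, Tuple
--
-- def split_into_slices(low: int, high: int, n: int) -> List[Tuple[int, int]]:
--     if n <= 0:
--         return []
--     total = high - low
--     base = total // n
--     rem = total % n
--     out = []
--     start = low
--     for i in range(n):
--         size = base + (1 if i < rem else 0)
--         end = start + size
--         if start < end:
--             out.append((start, end))
--         start = end
--     return out
-- ===== SOURCE B (Python) =====
-- def split_into_slices(low, high, n):
--     if n <= 0:
--         return []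
--     base, rem = divmod(high - low, n)
--     cuts = [low + i * base + min(i, rem) for i in range(n + 1)]
--     return [(a, b) for a, b in zip(cuts, cuts[1:]) if a < b]
-- ===== Notes on version B (the rewrite author's own statement) =====
-- stated objective: alternative
-- what changed: B drops A's running start accumulator: it builds the n+1 slice boundaries as a closed-form list, pairs adjacent boundaries with zip, and filters out empty slices.
import Mathlib
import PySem

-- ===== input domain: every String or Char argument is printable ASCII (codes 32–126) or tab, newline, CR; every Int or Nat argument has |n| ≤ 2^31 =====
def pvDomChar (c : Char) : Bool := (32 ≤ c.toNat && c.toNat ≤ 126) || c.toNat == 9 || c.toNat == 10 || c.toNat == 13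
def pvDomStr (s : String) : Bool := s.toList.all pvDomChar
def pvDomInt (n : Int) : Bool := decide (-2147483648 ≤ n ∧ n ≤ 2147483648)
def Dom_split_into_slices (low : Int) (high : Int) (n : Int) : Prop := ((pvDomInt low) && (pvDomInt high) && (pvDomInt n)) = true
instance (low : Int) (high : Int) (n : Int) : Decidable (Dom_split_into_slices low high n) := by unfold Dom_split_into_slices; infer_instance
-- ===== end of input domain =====

-- B replaces A's single accumulator loop by staged passes: a boundary list built in closed form,
-- then zip-with-tail and a filter; same O(n) cost, no running state (objective: alternative).

-- ===== PORT A =====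
-- Port of A: running `start` accumulator threaded through one loop.
def split_into_slices (low : Int) (high : Int) (n : Int) : List (Int × Int) :=
  if n ≤ 0 then []
  else
    let total := high - low
    let base := PySem.Int.floordiv total n
    let rem := PySem.Int.mod total n
    ((PySem.List.pyRange 0 n 1).foldl
      (fun (st : List (Int × Int) × Int) i =>
        let size := base + (if i < rem then 1 else 0)
        let e := st.2 + size
        (if st.2 < e then st.1 ++ [(st.2, e)] else st.1, e))
      ([], low)).1

-- ===== PORT B =====
-- Port of B: build the n+1 slice boundaries in closed form, pair adjacent ones, keep nonempty.
-- Hand-ported Python zip(xs, ys): tail-recursive so it evaluates on large lists; exact (= List.zip).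
def pvZipAux (acc : List (Int × Int)) : List Int → List Int → List (Int × Int)
  | a :: as, b :: bs => pvZipAux ((a, b) :: acc) as bs
  | _, _ => acc.reverse

def pvZip (xs ys : List Int) : List (Int × Int) := pvZipAux [] xs ys

def split_into_slices_alt (low : Int) (high : Int) (n : Int) : List (Int × Int) :=
  if n ≤ 0 then []
  else
    let base := PySem.Int.floordiv (high - low) n
    let rem := PySem.Int.mod (high - low) n
    let cuts := (PySem.List.pyRange 0 (n + 1) 1).map (fun i => low + i * base + min i rem)
    (pvZip cuts cuts.tail).filter (fun p => decide (p.1 < p.2))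

-- ===== PRECONDITION & SPEC =====
def Spec_split_into_slices (low : Int) (high : Int) (n : Int) (out : List (Int × Int)) : Prop := out = split_into_slices_alt low high n
instance (low : Int) (high : Int) (n : Int) (out : List (Int × Int)) : Decidable (Spec_split_into_slices low high n out) := by unfold Spec_split_into_slices; infer_instance

-- ===== CLAIM (what is proved, stated in full; the proofs are below) =====
def Claim_equal_split_into_slices : Prop := ∀ (low : Int) (high : Int) (n : Int), Dom_split_into_slices low high n → Spec_split_into_slices low high n (split_into_slices low high n)

-- ===== LEMMAS AND PROOFS =====

-- Loop invariant: A's fold from index j with start = low + j*base + min j rem produces the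
-- filtered list of closed-form slices for indices j..n-1.
theorem split_loop_eq (low base rem : Int) (n : Int) : ∀ (j : Int) (acc : List (Int × Int)),
    ((PySem.List.pyRange j n 1).foldl
      (fun (st : List (Int × Int) × Int) i =>
        let size := base + (if i < rem then 1 else 0)
        let e := st.2 + size
        (if st.2 < e then st.1 ++ [(st.2, e)] else st.1, e))
      (acc, low + j * base + min j rem)).1
    = acc ++ ((PySem.List.pyRange j n 1).map
        (fun i => (low + i * base + min i rem, low + (i + 1) * base + min (i + 1) rem))).filter
        (fun p => decide (p.1 < p.2)) := by
  intro j acc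
  by_cases h : n ≤ j
  · rw [PySem.List.pyRange_one_eq_nil h]; simp
  · rw [not_le] at h
    rw [PySem.List.pyRange_one_cons h]
    simp only [List.foldl_cons, List.map_cons, List.filter_cons]
    have hstep : low + j * base + min j rem + (base + (if j < rem then 1 else 0))
        = low + (j + 1) * base + min (j + 1) rem := by
      rcases lt_or_ge j rem with hlt | hge
      · simp [min_eq_left hlt.le, hlt]; ring
      · simp [min_eq_right hge, min_eq_right (by omega : rem ≤ j + 1), not_lt.mpr hge]; ring
    rw [hstep]
    by_cases hc : low + j * base + min j rem < low + (j + 1) * base + min (j + 1) rem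
    · simp only [hc, if_pos, decide_true]
      rw [split_loop_eq low base rem n (j + 1)]
      simp
    · simp only [hc, decide_false]
      rw [split_loop_eq low base rem n (j + 1)]
      simp
termination_by j => (n - j).toNat
decreasing_by all_goals omega

theorem pvZipAux_eq (xs : List Int) : ∀ (ys : List Int) (acc : List (Int × Int)),
    pvZipAux acc xs ys = acc.reverse ++ xs.zip ys := by
  induction xs with
  | nil => intro ys acc; cases ys <;> simp [pvZipAux]
  | cons a as ih =>
    intro ys acc
    cases ys with
    | nil => simp [pvZipAux]
    | cons b bs => simp [pvZipAux, ih]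

theorem pvZip_eq (xs ys : List Int) : pvZip xs ys = xs.zip ys := by
  simp [pvZip, pvZipAux_eq]

-- Adjacent pairs of the mapped range: zip-with-tail of (map f [j..m]) is the pair map over [j..m-1].
theorem zip_tail_range (f : Int → Int) (m : Int) : ∀ (j : Int),
    (((PySem.List.pyRange j (m + 1) 1).map f).zip ((PySem.List.pyRange j (m + 1) 1).map f).tail)
    = (PySem.List.pyRange j m 1).map (fun i => (f i, f (i + 1))) := by
  intro j
  by_cases h : m ≤ j
  · rw [PySem.List.pyRange_one_eq_nil h]
    by_cases h1 : m + 1 ≤ j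
    · rw [PySem.List.pyRange_one_eq_nil h1]; simp
    · rw [not_le] at h1
      rw [PySem.List.pyRange_one_cons h1, PySem.List.pyRange_one_eq_nil (by omega : m + 1 ≤ j + 1)]
      simp
  · rw [not_le] at h
    rw [PySem.List.pyRange_one_cons (by omega : j < m + 1),
        PySem.List.pyRange_one_cons (by omega : j + 1 < m + 1),
        PySem.List.pyRange_one_cons h]
    simp only [List.map_cons, List.tail_cons, List.zip_cons_cons]
    have hrec := zip_tail_range f m (j + 1)
    rw [PySem.List.pyRange_one_cons (by omega : j + 1 < m + 1), List.map_cons, List.tail_cons] at hrec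
    rw [hrec]
termination_by j => (m - j).toNat
decreasing_by omega

-- ===== VERDICT (by name: the statement is the Claim_ definition above) =====
theorem split_into_slices_spec : Claim_equal_split_into_slices := by
  intro low high n _
  unfold Spec_split_into_slices split_into_slices split_into_slices_alt
  by_cases h : n ≤ 0
  · simp [h]
  · simp only [h, if_false]
    have hr : 0 ≤ PySem.Int.mod (high - low) n :=
      PySem.Int.mod_nonneg _ (by omega)
    have hinv := split_loop_eq low (PySem.Int.floordiv (high - low) n)
      (PySem.Int.mod (high - low) n) n 0 []
    rw [show low + 0 * PySem.Int.floordiv (high - low) n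
          + min 0 (PySem.Int.mod (high - low) n) = low by
        rw [min_eq_left hr]; ring] at hinv
    rw [hinv, pvZip_eq, zip_tail_range]
    simp
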